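-- pv_equiv track=rewrite | github.com/JerzyCode/GraphManager | src/main/app/utils/algorithms.py | different_sets
-- ===== SOURCE A (Python) =====
-- def different_sets(vertex1, vertex2, wood):
--     set_a = set()
--     set_b = set()
--     for set1 in wood:
--         if vertex1 in set1:
--             set_a = set1
--             break
--     for set2 in wood:
--         if vertex2 in set2:
--             set_b = set2
--             break
--     return [set_a, set_b]
-- ===== SOURCE B (Python) =====
-- def different_sets(vertex1, vertex2, wood):
--     set_a = None
--     set_b = None
--     for s in wood:
--         if set_a is None and vertex1 in s:
--             set_a = s
--         if set_b is None and vertex2 in s: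
--             set_b = s
--         if set_a is not None and set_b is not None:
--             break
--     return [set_a if set_a is not None else set(),
--             set_b if set_b is not None else set()]
-- ===== Notes on version B (the rewrite author's own statement) =====
-- stated objective: alternative
-- what changed: Replaces A's two separate scans over wood with a single loop that tracks both first-containing sets via Option state and breaks early once both are found.
import Mathlib
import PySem

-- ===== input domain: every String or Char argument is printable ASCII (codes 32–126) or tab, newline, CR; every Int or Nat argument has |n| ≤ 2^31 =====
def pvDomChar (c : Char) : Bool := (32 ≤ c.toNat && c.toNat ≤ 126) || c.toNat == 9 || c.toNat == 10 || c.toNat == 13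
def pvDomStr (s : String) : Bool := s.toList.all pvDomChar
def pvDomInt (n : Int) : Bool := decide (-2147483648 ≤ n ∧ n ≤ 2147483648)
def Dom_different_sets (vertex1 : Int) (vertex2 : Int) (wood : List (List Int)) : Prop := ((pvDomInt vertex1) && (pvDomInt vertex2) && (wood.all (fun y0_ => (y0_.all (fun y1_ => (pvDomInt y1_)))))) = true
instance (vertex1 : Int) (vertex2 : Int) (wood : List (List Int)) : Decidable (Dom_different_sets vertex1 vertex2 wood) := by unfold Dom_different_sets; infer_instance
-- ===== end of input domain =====

-- B replaces A's two separate first-match scans over wood with one early-exiting pass tracking both sets (alternative decomposition, same cost).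


-- ===== PORT A =====
-- A's loop "for s in wood: if v in s: result = s; break" as structural recursion (first match, default empty set)
def pvFirstWith (v : Int) (wood : List (List Int)) : List Int :=
  match wood with
  | [] => []
  | s :: rest => if s.contains v then s else pvFirstWith v rest

def different_sets (vertex1 : Int) (vertex2 : Int) (wood : List (List Int)) : List (List Int) :=
  [pvFirstWith vertex1 wood, pvFirstWith vertex2 wood]

-- ===== PORT B =====
-- B: one pass carrying Option state for both vertices, breaking once both are found
def pvLoopB (v1 v2 : Int) (wood : List (List Int)) (a b : Option (List Int)) : List (List Int) :=
  match wood with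
  | [] => [a.getD [], b.getD []]
  | s :: rest =>
    let a' := if a.isNone && s.contains v1 then some s else a
    let b' := if b.isNone && s.contains v2 then some s else b
    if a'.isSome && b'.isSome then [a'.getD [], b'.getD []]
    else pvLoopB v1 v2 rest a' b'

def different_sets_alt (vertex1 : Int) (vertex2 : Int) (wood : List (List Int)) : List (List Int) :=
  pvLoopB vertex1 vertex2 wood none none

-- ===== PRECONDITION & SPEC =====
def Spec_different_sets (vertex1 : Int) (vertex2 : Int) (wood : List (List Int)) (out : List (List Int)) : Prop := out = different_sets_alt vertex1 vertex2 wood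
instance (vertex1 : Int) (vertex2 : Int) (wood : List (List Int)) (out : List (List Int)) : Decidable (Spec_different_sets vertex1 vertex2 wood out) := by unfold Spec_different_sets; infer_instance

-- ===== CLAIM (what is proved, stated in full; the proofs are below) =====
def Claim_equal_different_sets : Prop := ∀ (vertex1 : Int) (vertex2 : Int) (wood : List (List Int)), Dom_different_sets vertex1 vertex2 wood → Spec_different_sets vertex1 vertex2 wood (different_sets vertex1 vertex2 wood)

-- ===== LEMMAS AND PROOFS =====

-- ===== VERDICT (by name: the statement is the Claim_ definition above) =====
-- invariant: the one-pass loop with Option state computes each vertex's first containing set independently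
lemma pvLoopB_eq (v1 v2 : Int) (wood : List (List Int)) (a b : Option (List Int)) :
    pvLoopB v1 v2 wood a b =
      [a.getD (pvFirstWith v1 wood), b.getD (pvFirstWith v2 wood)] := by
  induction wood generalizing a b with
  | nil => simp [pvLoopB, pvFirstWith]
  | cons s rest ih =>
    cases a <;> cases b <;>
      simp only [pvLoopB, pvFirstWith, Option.isNone, Option.isSome, Bool.true_and,
        Bool.false_and] <;>
      split_ifs <;> simp_all [Option.getD]

theorem different_sets_spec : Claim_equal_different_sets := by
  intro v1 v2 wood _
  unfold Spec_different_sets different_sets different_sets_alt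
  rw [pvLoopB_eq]
  simp
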